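-- pv_equiv track=rewrite | github.com/Maverick04/Tongy-Agent | tongy_agent/sandbox.py | _extract_command_name
-- ===== SOURCE A (Python) =====
-- def _extract_command_name(command: str) -> str:
--     """
--     Extract the base command name from a command string.
--
--     Args:
--         command: Command string
--
--     Returns:
--         Base command name
--     """
--     # Remove leading/trailing whitespace
--     command = command.strip()
--
--     # Handle pipes and redirects by taking only the first command
--     for separator in ("|", ">", "<", "&", ";;"):
--         if separator in command:
--             command = command.split(separator)[0].strip()
--
--     # Extract the first word (command name)
--     parts = command.split()
--     if not parts:
--         return ""
--
--     # Handle paths (e.g., /usr/bin/python -> python)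
--     cmd_name = parts[0]
--     if "/" in cmd_name:
--         cmd_name = cmd_name.split("/")[-1]
--
--     return cmd_name
-- ===== SOURCE B (Python) =====
-- def _extract_command_name(command: str) -> str:
--     """Extract the base command name from a command string (one-pass scan)."""
--     s = command.strip()
--     # Cut at the earliest separator: any of | > < &, or the two-char token ";;".
--     cut = len(s)
--     for i, ch in enumerate(s):
--         if ch in "|><&" or (ch == ";" and s[i:i + 2] == ";;"):
--             cut = i
--             break
--     head = s[:cut].strip()
--     parts = head.split()
--     if not parts:
--         return ""
--     # Basename: everything after the last '/' (the word itself if there is none).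
--     return parts[0].rpartition("/")[2]
-- ===== Notes on version B (the rewrite author's own statement) =====
-- stated objective: alternative
-- what changed: A's five sequential split-at-separator-then-strip passes are replaced by a single left-to-right scan that cuts at the earliest separator (treating double-semicolon as a two-char token), and the final slash-split basename step by an rpartition-based one.
import Mathlib
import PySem

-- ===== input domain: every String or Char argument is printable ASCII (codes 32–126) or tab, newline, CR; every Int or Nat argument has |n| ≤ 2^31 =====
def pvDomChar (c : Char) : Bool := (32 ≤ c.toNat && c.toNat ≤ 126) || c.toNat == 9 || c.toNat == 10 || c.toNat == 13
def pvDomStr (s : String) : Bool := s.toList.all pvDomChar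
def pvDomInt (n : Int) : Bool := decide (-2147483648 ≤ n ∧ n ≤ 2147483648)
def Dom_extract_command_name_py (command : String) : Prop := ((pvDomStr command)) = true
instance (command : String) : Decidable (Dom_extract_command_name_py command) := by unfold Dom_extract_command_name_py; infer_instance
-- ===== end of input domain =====

-- B replaces A's five sequential split-at-separator passes by ONE left-to-right scan that
-- cuts at the earliest separator, and the final split('/')[-1] by an rpartition-style fold
-- (one-pass alternative of the same cost class; return value proved equal on all inputs).

-- ===== PORT A =====
-- transliteration of A: strip; for each separator in ("|",">","<","&",";;"), if present,
-- 'command = command.split(sep)[0].strip()' (split(sep) is never empty, so [0] is headD);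
-- then split(), '' if empty, and parts[0].split("/")[-1] when "/" occurs (getLastD).
def extract_command_name_py (command : String) : String :=
  let cmd0 := PySem.Chars.strip command.toList
  let cmd := [['|'], ['>'], ['<'], ['&'], [';', ';']].foldl
    (fun s sep =>
      if PySem.Chars.isIn sep s then PySem.Chars.strip ((PySem.Chars.splitOn s sep).headD []) else s)
    cmd0
  match PySem.Chars.split₀ cmd with
  | [] => ""
  | p :: _ =>
    if PySem.Chars.isIn ['/'] p then String.mk ((PySem.Chars.splitOn p ['/']).getLastD [])
    else String.mk p

-- ===== PORT B =====
-- one-pass scan of Source B: prefix of s before the first '|','>','<','&' or two-char ";;"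
def pvScanCut : List Char → List Char
  | [] => []
  | c :: rest =>
    if c = '|' ∨ c = '>' ∨ c = '<' ∨ c = '&' ∨ (c = ';' ∧ rest.head? = some ';') then []
    else c :: pvScanCut rest

-- transliteration of B: strip; one scan for the cut position; strip the prefix; split();
-- parts[0].rpartition("/")[2] hand-ported as a fold that resets at each '/' (exact).
def extract_command_name_py_alt (command : String) : String :=
  let s := PySem.Chars.strip command.toList
  let head := PySem.Chars.strip (pvScanCut s)
  match PySem.Chars.split₀ head with
  | [] => ""
  | p :: _ => String.mk ((p.foldl (fun acc ch => if ch = '/' then [] else ch :: acc) []).reverse)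

-- ===== PRECONDITION & SPEC =====
def Spec_extract_command_name_py (command : String) (out : String) : Prop := out = extract_command_name_py_alt command
instance (command : String) (out : String) : Decidable (Spec_extract_command_name_py command out) := by unfold Spec_extract_command_name_py; infer_instance

-- ===== CLAIM (what is proved, stated in full; the proofs are below) =====
def Claim_equal_extract_command_name_py : Prop := ∀ (command : String), Dom_extract_command_name_py command → Spec_extract_command_name_py command (extract_command_name_py command)

-- ===== LEMMAS AND PROOFS =====

-- prefix of s strictly before the first occurrence of sep (s itself if sep does not occur)
def pvCutAt (sep : List Char) : List Char → List Char
  | [] => []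
  | c :: rest => if sep.isPrefixOf (c :: rest) then [] else c :: pvCutAt sep rest

-- the accumulator of splitOn.go factors out
theorem pvGoAcc (sep : List Char) (fuel : Nat) (l cur : List Char) (acc : List (List Char)) :
    PySem.Chars.splitOn.go sep fuel l cur acc =
      acc.reverse ++ PySem.Chars.splitOn.go sep fuel l cur [] := by
  induction fuel generalizing l cur acc with
  | zero => rw [PySem.Chars.splitOn.go.eq_def, PySem.Chars.splitOn.go.eq_def]; simp
  | succ fuel ih =>
    rw [PySem.Chars.splitOn.go.eq_def]
    conv_rhs => rw [PySem.Chars.splitOn.go.eq_def]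
    cases l with
    | nil => simp
    | cons c rest =>
      simp only
      split
      · rw [ih _ _ (cur.reverse :: acc), ih _ _ [cur.reverse]]; simp
      · exact ih _ _ _

-- head of split(sep) is the prefix before the first occurrence of sep
theorem pvGoHead (sep : List Char) (hne : sep ≠ []) (fuel : Nat) :
    ∀ (l cur : List Char), l.length < fuel →
      (PySem.Chars.splitOn.go sep fuel l cur []).headD [] = cur.reverse ++ pvCutAt sep l := by
  induction fuel with
  | zero => intro l cur h; omega
  | succ fuel ih =>
    intro l cur h
    rw [PySem.Chars.splitOn.go.eq_def]
    cases l with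
    | nil => simp [pvCutAt]
    | cons c rest =>
      simp only [pvCutAt]
      split
      · rw [pvGoAcc]; simp
      · rw [ih rest (c :: cur) (by simpa using Nat.lt_of_succ_lt_succ h)]
        simp

theorem pvHeadSplitOn (s sep : List Char) (hne : sep ≠ []) :
    (PySem.Chars.splitOn s sep).headD [] = pvCutAt sep s := by
  rw [PySem.Chars.splitOn]
  simpa using pvGoHead sep hne (s.length + 1) s [] (by omega)

-- last piece of split on a single character, as a reset-on-separator fold
theorem pvGoLast (d : Char) (fuel : Nat) :
    ∀ (l cur : List Char) (acc : List (List Char)), l.length < fuel →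
      (PySem.Chars.splitOn.go [d] fuel l cur acc).getLastD [] =
        (l.foldl (fun acc ch => if ch = d then [] else ch :: acc) cur).reverse := by
  induction fuel with
  | zero => intro l cur acc h; omega
  | succ fuel ih =>
    intro l cur acc h
    rw [PySem.Chars.splitOn.go.eq_def]
    cases l with
    | nil => simp [List.getLastD_eq_getLast?, List.getLast?_reverse]
    | cons c rest =>
      simp only [List.foldl_cons]
      split
      · rename_i hp
        have hc : d = c := (List.cons_prefix_cons.mp (List.isPrefixOf_iff_prefix.mp hp)).1
        simp only [List.length_cons, List.length_nil, Nat.zero_add]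
        rw [List.drop_one, List.tail_cons,
          ih rest [] (cur.reverse :: acc) (by simpa using Nat.lt_of_succ_lt_succ h)]
        simp [hc]
      · rename_i hp
        have hc : ¬ c = d := by
          intro hcd; exact hp (by simp [hcd, List.isPrefixOf])
        rw [ih rest (c :: cur) acc (by simpa using Nat.lt_of_succ_lt_succ h)]
        simp [hc]

theorem pvLastSplitOn (p : List Char) (d : Char) :
    (PySem.Chars.splitOn p [d]).getLastD [] =
      (p.foldl (fun acc ch => if ch = d then [] else ch :: acc) []).reverse := by
  rw [PySem.Chars.splitOn]
  exact pvGoLast d (p.length + 1) p [] [] (by omega)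

theorem pvCutAt_not_infix (sep s : List Char) (h : ¬ sep <:+: s) : pvCutAt sep s = s := by
  induction s with
  | nil => rfl
  | cons c rest ih =>
    rw [pvCutAt]
    rw [if_neg (fun hp => h (List.infix_cons_iff.2 (Or.inl (List.isPrefixOf_iff_prefix.mp hp))))]
    rw [ih (fun hi => h ((List.infix_cons_iff).2 (Or.inr hi)))]

-- a fully non-whitespace pattern is a prefix of y ++ w (w all whitespace) iff it is one of y
theorem pvPrefixAppendWs (sep : List Char) (hsep : ∀ a ∈ sep, PySem.Chars.isspace a = false) :
    ∀ (y w : List Char), (∀ a ∈ w, PySem.Chars.isspace a = true) →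
      (sep <+: y ++ w ↔ sep <+: y) := by
  induction sep with
  | nil => intro y w _; simp
  | cons a as ih =>
    intro y w hw
    cases y with
    | nil =>
      simp only [List.nil_append]
      constructor
      · intro hp
        cases w with
        | nil => exact absurd hp (by simp)
        | cons b w' =>
          have := (List.cons_prefix_cons.mp hp).1
          have h1 := hsep a (by simp)
          have h2 := hw b (by simp)
          rw [this, h2] at h1; cases h1
      · intro hp; exact absurd hp (by simp)
    | cons c ys =>
      simp only [List.cons_append, List.cons_prefix_cons]
      constructor
      · rintro ⟨rfl, h2⟩
        exact ⟨rfl, ((ih (fun b hb => hsep b (by simp [hb]))) ys w hw).1 h2⟩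
      · rintro ⟨rfl, h2⟩
        exact ⟨rfl, ((ih (fun b hb => hsep b (by simp [hb]))) ys w hw).2 h2⟩

theorem pvMemTakeWhile (p : Char → Bool) (l : List Char) (a : Char)
    (h : a ∈ List.takeWhile p l) : p a = true := by
  induction l with
  | nil => simp at h
  | cons c r ih =>
    rw [List.takeWhile_cons] at h
    by_cases hc : p c = true
    · rw [if_pos hc] at h
      rcases List.mem_cons.mp h with rfl | hm
      · exact hc
      · exact ih hm
    · rw [if_neg hc] at h; simp at h

theorem pvHeadDropWhile (p : Char → Bool) (c : Char) (t x : List Char)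
    (h : List.dropWhile p x = c :: t) : p c = false := by
  have := List.head_dropWhile_not p (l := x) (by simp [h])
  simpa [h] using this

theorem pvNotInfixWs (sep : List Char) (hne : sep ≠ [])
    (hsep : ∀ a ∈ sep, PySem.Chars.isspace a = false)
    (w : List Char) (hw : ∀ a ∈ w, PySem.Chars.isspace a = true) : ¬ sep <:+: w := by
  intro hi
  obtain ⟨a, as, rfl⟩ := List.exists_cons_of_ne_nil hne
  have ha : a ∈ w := hi.subset (by simp)
  have h1 := hsep a (by simp)
  rw [hw a ha] at h1
  cases h1

theorem pvCutAtAppendWs (sep : List Char) (hne : sep ≠ [])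
    (hsep : ∀ a ∈ sep, PySem.Chars.isspace a = false) :
    ∀ (y w : List Char), (∀ a ∈ w, PySem.Chars.isspace a = true) →
      pvCutAt sep (y ++ w) = pvCutAt sep y ++ (if sep <:+: y then [] else w) := by
  intro y w hw
  induction y with
  | nil =>
    simp only [List.nil_append, pvCutAt]
    rw [if_neg (by simpa using hne), pvCutAt_not_infix sep w (pvNotInfixWs sep hne hsep w hw)]
  | cons c ys ih =>
    have hco : (sep.isPrefixOf (c :: ys ++ w) = true) ↔ (sep.isPrefixOf (c :: ys) = true) := by
      rw [List.isPrefixOf_iff_prefix, List.isPrefixOf_iff_prefix]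
      exact pvPrefixAppendWs sep hsep (c :: ys) w hw
    simp only [List.cons_append, pvCutAt]
    by_cases hp : sep.isPrefixOf (c :: ys) = true
    · rw [if_pos (by rw [← List.cons_append]; exact hco.2 hp), if_pos hp,
        if_pos (List.IsPrefix.isInfix (List.isPrefixOf_iff_prefix.mp hp))]
      simp
    · rw [if_neg (by rw [← List.cons_append]; exact fun h => hp (hco.1 h)), if_neg hp, ih]
      have hiff : (sep <:+: c :: ys) = (sep <:+: ys) := propext
        ⟨fun h => (List.infix_cons_iff.1 h).resolve_left
            (fun hpre => hp (List.isPrefixOf_iff_prefix.2 hpre)),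
          fun h => List.infix_cons_iff.2 (Or.inr h)⟩
      simp [hiff]

-- whitespace-strip commutation lemmas
theorem pvLstripCutAt (sep : List Char) (hne : sep ≠ [])
    (hsep : ∀ a ∈ sep, PySem.Chars.isspace a = false) (x : List Char) :
    pvCutAt sep (List.dropWhile PySem.Chars.isspace x) =
      List.dropWhile PySem.Chars.isspace (pvCutAt sep x) := by
  induction x with
  | nil => simp [pvCutAt]
  | cons c rest ih =>
    by_cases hws : PySem.Chars.isspace c = true
    · have hnp : ¬ sep.isPrefixOf (c :: rest) = true := by
        intro hp
        obtain ⟨a, as, rfl⟩ := List.exists_cons_of_ne_nil hne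
        have hac : a = c := (List.cons_prefix_cons.mp (List.isPrefixOf_iff_prefix.mp hp)).1
        have h1 := hsep a (by simp)
        rw [hac, hws] at h1
        cases h1
      rw [List.dropWhile_cons, if_pos hws, pvCutAt, if_neg hnp, List.dropWhile_cons,
        if_pos hws]
      exact ih
    · rw [List.dropWhile_cons, if_neg hws, pvCutAt]
      split
      · simp
      · rw [List.dropWhile_cons, if_neg hws]

theorem pvRstripAppendWs (q v : List Char) (hv : ∀ a ∈ v, PySem.Chars.isspace a = true) :
    PySem.Chars.rstrip (q ++ v) = PySem.Chars.rstrip q := by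
  rw [PySem.Chars.rstrip, PySem.Chars.rstrip, List.reverse_append, List.dropWhile_append]
  have h0 : List.dropWhile PySem.Chars.isspace v.reverse = [] :=
    List.dropWhile_eq_nil_iff.mpr (fun a ha => hv a (by simpa using ha))
  rw [h0]
  simp

theorem pvStripAppendWs (u v : List Char) (hv : ∀ a ∈ v, PySem.Chars.isspace a = true) :
    PySem.Chars.strip (u ++ v) = PySem.Chars.strip u := by
  rw [PySem.Chars.strip, PySem.Chars.strip, PySem.Chars.lstrip, PySem.Chars.lstrip,
    List.dropWhile_append]
  by_cases he : (List.dropWhile PySem.Chars.isspace u).isEmpty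
  · rw [if_pos he, List.dropWhile_eq_nil_iff.mpr (fun a ha => hv a ha),
      List.isEmpty_iff.mp he]
  · rw [if_neg he]
    exact pvRstripAppendWs _ _ hv

theorem pvStripLstrip (y : List Char) :
    PySem.Chars.strip (List.dropWhile PySem.Chars.isspace y) = PySem.Chars.strip y := by
  rw [PySem.Chars.strip, PySem.Chars.strip, PySem.Chars.lstrip, PySem.Chars.lstrip,
    List.dropWhile_idempotent]

theorem pvLstripRstripLstrip (x : List Char) :
    List.dropWhile PySem.Chars.isspace (PySem.Chars.rstrip (List.dropWhile PySem.Chars.isspace x)) =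
      PySem.Chars.rstrip (List.dropWhile PySem.Chars.isspace x) := by
  cases hq : PySem.Chars.rstrip (List.dropWhile PySem.Chars.isspace x) with
  | nil => simp
  | cons c t =>
    have hzz : (c :: t) <+: List.dropWhile PySem.Chars.isspace x := by
      rw [← hq, PySem.Chars.rstrip]
      have := List.reverse_prefix.mpr (List.dropWhile_suffix
        (l := (List.dropWhile PySem.Chars.isspace x).reverse) PySem.Chars.isspace)
      simpa using this
    obtain ⟨r, hr⟩ := hzz
    have hwsc : PySem.Chars.isspace c = false := by
      refine pvHeadDropWhile PySem.Chars.isspace c (t ++ r) x ?_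
      rw [← hr]
      simp
    rw [List.dropWhile_cons, if_neg (by simp [hwsc])]

theorem pvRstripRstrip (q : List Char) :
    PySem.Chars.rstrip (PySem.Chars.rstrip q) = PySem.Chars.rstrip q := by
  rw [PySem.Chars.rstrip, PySem.Chars.rstrip, List.reverse_reverse, List.dropWhile_idempotent]

theorem pvStripStrip (x : List Char) :
    PySem.Chars.strip (PySem.Chars.strip x) = PySem.Chars.strip x := by
  rw [PySem.Chars.strip, PySem.Chars.lstrip]
  conv_lhs => rw [PySem.Chars.strip, PySem.Chars.lstrip, pvLstripRstripLstrip]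
  exact pvRstripRstrip _

theorem pvStripCutAtStrip (sep : List Char) (hne : sep ≠ [])
    (hsep : ∀ a ∈ sep, PySem.Chars.isspace a = false) (x : List Char) :
    PySem.Chars.strip (pvCutAt sep (PySem.Chars.strip x)) =
      PySem.Chars.strip (pvCutAt sep x) := by
  have hz : List.dropWhile PySem.Chars.isspace x =
      PySem.Chars.rstrip (List.dropWhile PySem.Chars.isspace x) ++
        (List.takeWhile PySem.Chars.isspace (List.dropWhile PySem.Chars.isspace x).reverse).reverse := by
    rw [PySem.Chars.rstrip]
    conv_lhs => rw [← List.reverse_reverse (List.dropWhile PySem.Chars.isspace x),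
      ← List.takeWhile_append_dropWhile (p := PySem.Chars.isspace)
        (l := (List.dropWhile PySem.Chars.isspace x).reverse)]
    rw [List.reverse_append]
  have hw : ∀ a ∈ (List.takeWhile PySem.Chars.isspace (List.dropWhile PySem.Chars.isspace x).reverse).reverse,
      PySem.Chars.isspace a = true :=
    fun a ha => pvMemTakeWhile _ _ _ (by simpa using ha)
  calc PySem.Chars.strip (pvCutAt sep (PySem.Chars.strip x))
      = PySem.Chars.strip (pvCutAt sep (PySem.Chars.rstrip (List.dropWhile PySem.Chars.isspace x))) := rfl
    _ = PySem.Chars.strip (pvCutAt sep (PySem.Chars.rstrip (List.dropWhile PySem.Chars.isspace x)) ++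
          (if sep <:+: PySem.Chars.rstrip (List.dropWhile PySem.Chars.isspace x) then []
            else (List.takeWhile PySem.Chars.isspace (List.dropWhile PySem.Chars.isspace x).reverse).reverse)) := by
        by_cases hi : sep <:+: PySem.Chars.rstrip (List.dropWhile PySem.Chars.isspace x)
        · rw [if_pos hi, List.append_nil]
        · rw [if_neg hi, pvStripAppendWs _ _ hw]
    _ = PySem.Chars.strip (pvCutAt sep (List.dropWhile PySem.Chars.isspace x)) := by
        rw [← pvCutAtAppendWs sep hne hsep _ _ hw, ← hz]
    _ = PySem.Chars.strip (List.dropWhile PySem.Chars.isspace (pvCutAt sep x)) := by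
        rw [pvLstripCutAt sep hne hsep x]
    _ = PySem.Chars.strip (pvCutAt sep x) := pvStripLstrip _

-- one loop iteration of A, on an already-stripped state
theorem pvStep (sep s : List Char) (hne : sep ≠ [])
    (hsep : ∀ a ∈ sep, PySem.Chars.isspace a = false)
    (hs : PySem.Chars.strip s = s) :
    (if PySem.Chars.isIn sep s then PySem.Chars.strip ((PySem.Chars.splitOn s sep).headD []) else s) =
      PySem.Chars.strip (pvCutAt sep s) := by
  by_cases h : PySem.Chars.isIn sep s = true
  · rw [if_pos h, pvHeadSplitOn s sep hne]
  · rw [if_neg h]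
    have hni : ¬ sep <:+: s := (PySem.Chars.isIn_eq_false_iff sep s).mp (by simpa using h)
    rw [pvCutAt_not_infix sep s hni, hs]

-- B's one-pass scan equals A's chain of five cuts
def pvChain4 (y : List Char) : List Char :=
  pvCutAt ['&'] (pvCutAt ['<'] (pvCutAt ['>'] (pvCutAt ['|'] y)))

theorem pvChain4_cons (c : Char) (r : List Char) :
    pvChain4 (c :: r) =
      if c = '|' ∨ c = '>' ∨ c = '<' ∨ c = '&' then [] else c :: pvChain4 r := by
  by_cases h1 : c = '|'
  · subst h1; simp [pvChain4, pvCutAt, List.isPrefixOf]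
  · by_cases h2 : c = '>'
    · subst h2; simp [pvChain4, pvCutAt, List.isPrefixOf]
    · by_cases h3 : c = '<'
      · subst h3; simp [pvChain4, pvCutAt, List.isPrefixOf]
      · by_cases h4 : c = '&'
        · subst h4; simp [pvChain4, pvCutAt, List.isPrefixOf]
        · rw [if_neg (by tauto)]
          simp [pvChain4, pvCutAt, List.isPrefixOf,
            (by simpa [eq_comm] using h1 : ¬ '|' = c), (by simpa [eq_comm] using h2 : ¬ '>' = c),
            (by simpa [eq_comm] using h3 : ¬ '<' = c), (by simpa [eq_comm] using h4 : ¬ '&' = c)]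

theorem pvChain4_head (r : List Char) :
    ((pvChain4 r).head? = some ';') ↔ (r.head? = some ';') := by
  cases r with
  | nil => simp [pvChain4, pvCutAt]
  | cons a r' =>
    rw [pvChain4_cons]
    by_cases h : a = '|' ∨ a = '>' ∨ a = '<' ∨ a = '&'
    · rw [if_pos h]
      constructor
      · intro hh; simp at hh
      · intro hh
        have : a = ';' := by simpa using hh
        subst this
        rcases h with h | h | h | h <;> exact absurd h (by decide)
    · rw [if_neg h]; simp

theorem pvPrefixSemi (z : List Char) : ([';'].isPrefixOf z = true) ↔ (z.head? = some ';') := by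
  cases z with
  | nil => simp [List.isPrefixOf]
  | cons a t =>
    simp only [List.isPrefixOf, Bool.and_true, beq_iff_eq,
      List.head?_cons, Option.some.injEq]
    exact eq_comm

theorem pvScanChain (y : List Char) :
    pvCutAt [';', ';'] (pvChain4 y) = pvScanCut y := by
  induction y with
  | nil => rfl
  | cons c r ih =>
    rw [pvChain4_cons]
    by_cases h4 : c = '|' ∨ c = '>' ∨ c = '<' ∨ c = '&'
    · rw [if_pos h4]
      simp only [pvScanCut]
      rw [if_pos (by tauto)]
      rfl
    · rw [if_neg h4, pvCutAt]
      simp only [pvScanCut]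
      by_cases hsc : c = ';' ∧ r.head? = some ';'
      · obtain ⟨rfl, hr⟩ := hsc
        rw [if_pos (by
          show ([';', ';'].isPrefixOf (';' :: pvChain4 r)) = true
          simp only [List.isPrefixOf, BEq.rfl, Bool.true_and]
          exact (pvPrefixSemi _).mpr ((pvChain4_head r).mpr hr)),
          if_pos (by tauto)]
      · have hnp : ¬ ([';', ';'].isPrefixOf (c :: pvChain4 r)) = true := by
          intro hp
          simp only [List.isPrefixOf, Bool.and_eq_true, beq_iff_eq] at hp
          exact hsc ⟨hp.1.symm, (pvChain4_head r).mp ((pvPrefixSemi _).mp hp.2)⟩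
        rw [if_neg hnp, if_neg (by tauto), ih]

-- the reset fold on a '/'-free word returns the word
theorem pvFoldNoSep (d : Char) (p : List Char) (h : d ∉ p) :
    ∀ acc, p.foldl (fun acc ch => if ch = d then [] else ch :: acc) acc = p.reverse ++ acc := by
  induction p with
  | nil => intro acc; simp
  | cons c rest ih =>
    intro acc
    have hc : ¬ c = d := fun hcd => h (by simp [hcd])
    rw [List.foldl_cons, if_neg hc, ih (fun hm => h (by simp [hm]))]
    simp

-- ===== VERDICT (by name: the statement is the Claim_ definition above) =====
theorem pvSepWs1 (d : Char) (hd : PySem.Chars.isspace d = false) :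
    ∀ a ∈ [d], PySem.Chars.isspace a = false := by
  intro a ha
  rcases List.mem_singleton.mp ha with rfl
  exact hd

theorem pvSepWs2 : ∀ a ∈ ([';', ';'] : List Char), PySem.Chars.isspace a = false := by
  intro a ha
  rcases List.mem_cons.mp ha with rfl | ha
  · rfl
  · rcases List.mem_singleton.mp ha with rfl; rfl

theorem extract_command_name_py_spec : Claim_equal_extract_command_name_py := by
  intro command _
  unfold Spec_extract_command_name_py
  unfold extract_command_name_py extract_command_name_py_alt
  simp only [List.foldl_cons, List.foldl_nil]
  rw [pvStep ['|'] _ (List.cons_ne_nil _ _) (pvSepWs1 '|' rfl) (pvStripStrip _)]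
  rw [pvStep ['>'] _ (List.cons_ne_nil _ _) (pvSepWs1 '>' rfl) (pvStripStrip _),
    pvStripCutAtStrip ['>'] (List.cons_ne_nil _ _) (pvSepWs1 '>' rfl)]
  rw [pvStep ['<'] _ (List.cons_ne_nil _ _) (pvSepWs1 '<' rfl) (pvStripStrip _),
    pvStripCutAtStrip ['<'] (List.cons_ne_nil _ _) (pvSepWs1 '<' rfl)]
  rw [pvStep ['&'] _ (List.cons_ne_nil _ _) (pvSepWs1 '&' rfl) (pvStripStrip _),
    pvStripCutAtStrip ['&'] (List.cons_ne_nil _ _) (pvSepWs1 '&' rfl)]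
  rw [pvStep [';', ';'] _ (List.cons_ne_nil _ _) pvSepWs2 (pvStripStrip _),
    pvStripCutAtStrip [';', ';'] (List.cons_ne_nil _ _) pvSepWs2]
  rw [show pvCutAt ['&'] (pvCutAt ['<'] (pvCutAt ['>']
      (pvCutAt ['|'] (PySem.Chars.strip command.toList)))) =
    pvChain4 (PySem.Chars.strip command.toList) from rfl, pvScanChain]
  cases hsp : PySem.Chars.split₀ (PySem.Chars.strip (pvScanCut (PySem.Chars.strip command.toList))) with
  | nil => rfl
  | cons p ps =>
    simp only
    by_cases hin : PySem.Chars.isIn ['/'] p = true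
    · rw [if_pos hin, pvLastSplitOn]
    · rw [if_neg hin]
      have hmem : '/' ∉ p := fun hm =>
        (by simpa using hin : ¬ PySem.Chars.isIn ['/'] p = true)
          ((PySem.Chars.isIn_iff_infix ['/'] p).mpr ((List.singleton_infix_iff '/' p).mpr hm))
      rw [pvFoldNoSep '/' p hmem []]
      simp
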